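-- pv_equiv track=rewrite | github.com/r0cd7b/python-for-coding-test | 2022 KAKAO BLIND RECRUITMENT/1.py | solution
-- ===== SOURCE A (Python) =====
-- def solution(id_list, report, k):
--     numbers = [set() for _ in range(len(id_list))]
--     ids = {id_list[i]: i for i in range(len(id_list))}
--     for r in report:
--         user1, user2 = r.split()
--         numbers[ids[user2]].add(ids[user1])
--
--     answer = [0] * len(id_list)
--     for reported in numbers:
--         if len(reported) >= k:
--             for id_ in reported:
--                 answer[id_] += 1
--     return answer
-- ===== SOURCE B (Python) =====
-- def solution(id_list, report, k):
--     pos = {name: i for i, name in enumerate(id_list)}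
--     pairs = set()
--     for r in report:
--         u1, u2 = r.split()
--         pairs.add((u1, u2))
--     cnt = {}
--     for _u1, u2 in pairs:
--         cnt[u2] = cnt.get(u2, 0) + 1
--     res = [0] * len(id_list)
--     for u1, u2 in pairs:
--         if cnt[u2] >= k:
--             res[pos[u1]] += 1
--     return res
-- ===== Notes on version B (the rewrite author's own statement) =====
-- stated objective: simpler
-- what changed: Replaces the per-user array-of-sets grouping (one set of reporter indices per user, then a nested award loop over each qualifying set) by a count-first flat structure: one deduplicated set of (reporter, reported) name pairs, a counter of distinct reporters per reported name, and a single flat pass awarding +1 at the reporter's index for each qualifying pair.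
import Mathlib
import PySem

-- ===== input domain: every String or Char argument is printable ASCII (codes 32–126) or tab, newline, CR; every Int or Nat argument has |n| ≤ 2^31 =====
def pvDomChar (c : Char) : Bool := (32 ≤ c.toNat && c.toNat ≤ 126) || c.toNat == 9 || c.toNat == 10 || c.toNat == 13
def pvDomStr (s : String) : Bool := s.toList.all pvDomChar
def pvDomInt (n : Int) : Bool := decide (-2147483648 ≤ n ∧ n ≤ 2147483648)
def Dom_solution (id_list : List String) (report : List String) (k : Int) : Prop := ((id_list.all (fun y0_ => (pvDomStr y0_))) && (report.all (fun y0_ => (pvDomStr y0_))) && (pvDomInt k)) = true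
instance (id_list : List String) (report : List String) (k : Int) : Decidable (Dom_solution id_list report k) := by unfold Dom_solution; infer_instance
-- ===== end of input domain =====

-- B replaces A's index-based array-of-sets grouping and nested award loop by a
-- count-first flat structure (dedup pair set, per-reported counter, one flat
-- awarding pass, final map over id_list); objective: simpler.

-- ===== PORT A =====
-- ids = {id_list[i]: i for i in range(len(id_list))}
def pvAIds (id_list : List String) : PySem.Dict String Int :=
  (PySem.List.pyRange 0 (PySem.List.len id_list) 1).foldl
    (fun d i => d.insert (PySem.List.pyGetD id_list i "") i) PySem.Dict.empty

-- loop body: user1, user2 = r.split(); numbers[ids[user2]].add(ids[user1])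
-- (ids.getD · 0 is the total form of ids[·]; KeyError / ValueError are excluded by Pre_)
def pvAStep (ids : PySem.Dict String Int) (nums : List (PySem.Set Int)) (r : String) :
    List (PySem.Set Int) :=
  match PySem.Str.split₀ r with
  | [user1, user2] =>
      PySem.List.pySetD nums (ids.getD user2 0)
        (PySem.Set.add (PySem.List.pyGetD nums (ids.getD user2 0) PySem.Set.empty)
          (ids.getD user1 0))
  | _ => nums

-- answer[id_] += 1
def pvAInc (a : List Int) (id_ : Int) : List Int :=
  PySem.List.pySetD a id_ (PySem.List.pyGetD a id_ 0 + 1)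

-- if len(reported) >= k: for id_ in reported: answer[id_] += 1
def pvAAward (k : Int) (ans : List Int) (reported : PySem.Set Int) : List Int :=
  if k ≤ PySem.Set.len reported then reported.foldl pvAInc ans else ans

def solution (id_list : List String) (report : List String) (k : Int) : List Int :=
  -- numbers = [set() for _ in range(len(id_list))]
  let numbers0 : List (PySem.Set Int) :=
    (PySem.List.pyRange 0 (PySem.List.len id_list) 1).map (fun _ => PySem.Set.empty)
  let ids := pvAIds id_list
  -- for r in report: ...
  let numbers := report.foldl (pvAStep ids) numbers0
  -- answer = [0] * len(id_list)
  let answer0 : List Int := List.replicate id_list.length 0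
  -- for reported in numbers: ...
  numbers.foldl (pvAAward k) answer0

-- ===== PORT B =====
-- pos = {name: i for i, name in enumerate(id_list)}
def pvBPos (id_list : List String) : PySem.Dict String Int :=
  (PySem.List.enumerate id_list).foldl (fun d p => d.insert p.2 p.1) PySem.Dict.empty

-- loop body: u1, u2 = r.split(); pairs.add((u1, u2))
def pvBPair (s : PySem.Set (String × String)) (r : String) : PySem.Set (String × String) :=
  match PySem.Str.split₀ r with
  | [u1, u2] => PySem.Set.add s (u1, u2)
  | _ => s

def solution_alt (id_list : List String) (report : List String) (k : Int) : List Int :=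
  let pos := pvBPos id_list
  -- pairs = set(); for r in report: u1, u2 = r.split(); pairs.add((u1, u2))
  let pairs : PySem.Set (String × String) := report.foldl pvBPair PySem.Set.empty
  -- cnt[u2] = cnt.get(u2, 0) + 1  over the pair set
  let cnt : PySem.Dict String Int :=
    pairs.foldl (fun d p => d.modify p.2 0 (· + 1)) PySem.Dict.empty
  -- res = [0] * len(id_list)
  let res0 : List Int := List.replicate id_list.length 0
  -- for (u1, u2) in pairs: if cnt[u2] >= k: res[pos[u1]] += 1
  pairs.foldl (fun a p =>
    if k ≤ cnt.getD p.2 0 then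
      PySem.List.pySetD a (pos.getD p.1 0) (PySem.List.pyGetD a (pos.getD p.1 0) 0 + 1)
    else a) res0

-- ===== PRECONDITION & SPEC =====
-- Pre_ excludes exactly the reports that do not split into two tokens or whose tokens
-- are not in id_list — there A raises ValueError resp. KeyError.
def Pre_solution (id_list : List String) (report : List String) (k : Int) : Prop :=
  ∀ r ∈ report, (PySem.Str.split₀ r).length = 2 ∧
    ((PySem.Str.split₀ r)[0]?.getD "") ∈ id_list ∧
    ((PySem.Str.split₀ r)[1]?.getD "") ∈ id_list
instance (id_list : List String) (report : List String) (k : Int) : Decidable (Pre_solution id_list report k) := by unfold Pre_solution; infer_instance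

def pvWitness_solution : List String × List String × Int :=
  (["muzi", "frodo", "apeach"], ["muzi frodo", "apeach frodo", "muzi frodo"], 2)

def Spec_solution (id_list : List String) (report : List String) (k : Int) (out : List Int) : Prop := out = solution_alt id_list report k
instance (id_list : List String) (report : List String) (k : Int) (out : List Int) : Decidable (Spec_solution id_list report k out) := by unfold Spec_solution; infer_instance

-- ===== CLAIM (what is proved, stated in full; the proofs are below) =====
def Claim_equal_solution : Prop := ∀ (id_list : List String) (report : List String) (k : Int), Dom_solution id_list report k → Pre_solution id_list report k → Spec_solution id_list report k (solution id_list report k)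


-- ===== LEMMAS AND PROOFS =====

-- the pair a well-formed report line denotes
def pvParse (r : String) : String × String :=
  (((PySem.Str.split₀ r)[0]?).getD "", ((PySem.Str.split₀ r)[1]?).getD "")

-- A's loop body after the split has been resolved
def pvAStep2 (ids : PySem.Dict String Int) (nums : List (PySem.Set Int)) (p : String × String) :
    List (PySem.Set Int) :=
  PySem.List.pySetD nums (ids.getD p.2 0)
    (PySem.Set.add (PySem.List.pyGetD nums (ids.getD p.2 0) PySem.Set.empty) (ids.getD p.1 0))

-- the set of reporter indices A accumulates in slot j
def pvSlot (id_list : List String) (L : List (String × String)) (j : Int) : PySem.Set Int :=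
  PySem.Set.ofList ((L.filter (fun p => (pvAIds id_list).getD p.2 0 == j)).map
    (fun p => (pvAIds id_list).getD p.1 0))

lemma pvAStep_eq (ids : PySem.Dict String Int) (nums : List (PySem.Set Int)) (r : String)
    (h : (PySem.Str.split₀ r).length = 2) : pvAStep ids nums r = pvAStep2 ids nums (pvParse r) := by
  unfold pvAStep pvAStep2 pvParse
  rcases hl : PySem.Str.split₀ r with _ | ⟨a, _ | ⟨b, _ | ⟨c, t⟩⟩⟩
  · rw [hl] at h; simp at h
  · rw [hl] at h; simp at h
  · simp
  · rw [hl] at h; simp at h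

lemma pvBPair_eq (s : PySem.Set (String × String)) (r : String)
    (h : (PySem.Str.split₀ r).length = 2) : pvBPair s r = PySem.Set.add s (pvParse r) := by
  unfold pvBPair pvParse
  rcases hl : PySem.Str.split₀ r with _ | ⟨a, _ | ⟨b, _ | ⟨c, t⟩⟩⟩
  · rw [hl] at h; simp at h
  · rw [hl] at h; simp at h
  · simp
  · rw [hl] at h; simp at h

lemma pv_ids_get?_not_mem (xs : List String) : ∀ (s : Int) (d : PySem.Dict String Int)
    (u : String), u ∉ xs →
    ((PySem.List.enumerate xs s).foldl (fun d p => d.insert p.2 p.1) d).get? u = d.get? u := by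
  induction xs with
  | nil => intro s d u _; simp [PySem.List.enumerate_nil]
  | cons x t ih =>
      intro s d u hu
      rw [PySem.List.enumerate_cons]
      simp only [List.foldl_cons]
      rw [ih (s + 1) _ u (fun h => hu (List.mem_cons_of_mem _ h))]
      rw [PySem.Dict.get?_insert]
      rw [if_neg (fun h => hu (by rw [h]; exact List.mem_cons_self))]

-- the name->index dict sends each present name to the index of one of its occurrences
lemma pv_ids_occ (xs : List String) : ∀ (s : Int) (d : PySem.Dict String Int) (u : String),
    u ∈ xs →
    ∃ i : Nat, i < xs.length ∧
      ((PySem.List.enumerate xs s).foldl (fun d p => d.insert p.2 p.1) d).get? u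
        = some (s + (i : Int)) ∧ xs[i]? = some u := by
  induction xs with
  | nil => intro s d u hu; simp at hu
  | cons x t ih =>
      intro s d u hu
      rw [PySem.List.enumerate_cons]
      simp only [List.foldl_cons]
      by_cases hut : u ∈ t
      · obtain ⟨i, hi, hg, he⟩ := ih (s + 1) _ u hut
        refine ⟨i + 1, by simpa using hi, ?_, by simpa using he⟩
        rw [hg]
        congr 1
        push_cast
        ring
      · have hux : u = x := by
          rcases List.mem_cons.mp hu with h | h
          · exact h
          · exact absurd h hut
        subst hux
        refine ⟨0, by simp, ?_, by simp⟩
        rw [pv_ids_get?_not_mem t (s + 1) _ u hut]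
        rw [PySem.Dict.get?_insert, if_pos rfl]
        simp

lemma pvAIds_eq (id_list : List String) :
    pvAIds id_list
      = (PySem.List.enumerate id_list).foldl (fun d p => d.insert p.2 p.1) PySem.Dict.empty := by
  unfold pvAIds
  rw [PySem.List.enumerate_eq_map_pyRange id_list "", List.foldl_map]

lemma pvBPos_eq (id_list : List String) : pvBPos id_list = pvAIds id_list := by
  rw [pvAIds_eq]
  rfl

-- the needed facts about ids.getD: it points at an occurrence, and is injective on names
lemma pv_idx_occ (id_list : List String) (u : String) (hu : u ∈ id_list) :
    ∃ i : Nat, i < id_list.length ∧ (pvAIds id_list).getD u 0 = (i : Int)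
      ∧ id_list[i]? = some u := by
  obtain ⟨i, hi, hg, he⟩ := pv_ids_occ id_list 0 PySem.Dict.empty u hu
  refine ⟨i, hi, ?_, he⟩
  rw [pvAIds_eq, PySem.Dict.getD_eq_get?_getD, hg]
  simp

lemma pv_idx_nonneg (id_list : List String) (u : String) (hu : u ∈ id_list) :
    0 ≤ (pvAIds id_list).getD u 0 := by
  obtain ⟨i, _, hg, _⟩ := pv_idx_occ id_list u hu
  rw [hg]
  positivity

lemma pv_idx_lt (id_list : List String) (u : String) (hu : u ∈ id_list) :
    (pvAIds id_list).getD u 0 < (id_list.length : Int) := by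
  obtain ⟨i, hi, hg, _⟩ := pv_idx_occ id_list u hu
  rw [hg]
  exact_mod_cast hi

lemma pv_idx_inj (id_list : List String) (u v : String) (hu : u ∈ id_list) (hv : v ∈ id_list)
    (h : (pvAIds id_list).getD u 0 = (pvAIds id_list).getD v 0) : u = v := by
  obtain ⟨i, hi, hgi, hei⟩ := pv_idx_occ id_list u hu
  obtain ⟨i', hi', hgi', hei'⟩ := pv_idx_occ id_list v hv
  rw [hgi, hgi'] at h
  have hii : i = i' := by exact_mod_cast h
  rw [hii, hei'] at hei
  exact (Option.some.inj hei).symm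

lemma pv_numbers0 (id_list : List String) :
    (PySem.List.pyRange 0 (PySem.List.len id_list) 1).map (fun _ => (PySem.Set.empty : PySem.Set Int))
      = List.replicate id_list.length PySem.Set.empty := by
  rw [PySem.List.pyRange_one, List.map_map]
  have hc : ((fun _ => (PySem.Set.empty : PySem.Set Int)) ∘ fun k : Nat => ((0 : Int) + (k : Int)))
      = fun _ => PySem.Set.empty := rfl
  rw [hc, List.map_const', List.length_range]
  simp [PySem.List.len]

lemma pv_group_len (ids : PySem.Dict String Int) (L : List (String × String)) :
    ∀ (nums : List (PySem.Set Int)), (L.foldl (pvAStep2 ids) nums).length = nums.length := by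
  induction L with
  | nil => intro nums; rfl
  | cons p t ih =>
      intro nums
      simp only [List.foldl_cons]
      rw [ih]
      simp [pvAStep2, PySem.List.length_pySetD]

lemma pv_group (id_list : List String) :
    ∀ (L : List (String × String)), (∀ p ∈ L, p.1 ∈ id_list ∧ p.2 ∈ id_list) →
    ∀ (nums : List (PySem.Set Int)) (hlen : nums.length = id_list.length)
      (j : Nat) (hj : j < id_list.length),
    (L.foldl (pvAStep2 (pvAIds id_list)) nums)[j]?
      = some (PySem.Set.update (nums[j]'(by omega))
          ((L.filter (fun p => (pvAIds id_list).getD p.2 0 == (j : Int))).map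
            (fun p => (pvAIds id_list).getD p.1 0))) := by
  intro L
  induction L with
  | nil =>
      intro _ nums hlen j hj
      simp only [List.foldl_nil, List.filter_nil, List.map_nil]
      rw [List.getElem?_eq_getElem (by omega)]
      rfl
  | cons p t ih =>
      intro hc nums hlen j hj
      simp only [List.foldl_cons]
      have hp := hc p List.mem_cons_self
      obtain ⟨i2, hi2, hg2, _⟩ := pv_idx_occ id_list p.2 hp.2
      have hi2' : i2 < nums.length := by omega
      have hstep : pvAStep2 (pvAIds id_list) nums p
          = nums.set i2 (PySem.Set.add (nums[i2]'hi2') ((pvAIds id_list).getD p.1 0)) := by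
        unfold pvAStep2
        rw [hg2, PySem.List.pySetD_of_nonneg _ _ (by positivity)]
        rw [PySem.List.pyGetD_eq_getElem _ _ (by positivity) (by exact_mod_cast hi2')]
        simp
      rw [hstep, ih (fun q hq => hc q (List.mem_cons_of_mem _ hq)) _ (by simp [hlen]) j hj]
      congr 1
      rw [List.filter_cons]
      by_cases hpj : i2 = j
      · rw [if_pos (by rw [hg2, hpj]; simp), List.map_cons]
        have hupd : PySem.Set.update (nums[j]'(by omega))
              ((pvAIds id_list).getD p.1 0 ::
                (t.filter (fun p => (pvAIds id_list).getD p.2 0 == (j : Int))).map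
                  (fun p => (pvAIds id_list).getD p.1 0))
            = PySem.Set.update
                (PySem.Set.add (nums[j]'(by omega)) ((pvAIds id_list).getD p.1 0))
                ((t.filter (fun p => (pvAIds id_list).getD p.2 0 == (j : Int))).map
                  (fun p => (pvAIds id_list).getD p.1 0)) := rfl
        rw [hupd]
        congr 1
        subst hpj
        exact List.getElem_set_self _
      · rw [if_neg (by rw [hg2]; simpa using fun h => hpj (by exact_mod_cast h))]
        congr 1
        exact List.getElem_set_ne hpj _

-- one `answer[i] += 1` step, seen at position m
lemma pv_inc_one (a : List Int) (i : Int) (hi : 0 ≤ i) (m : Nat) (hm : m < a.length) :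
    (PySem.List.pySetD a i (PySem.List.pyGetD a i 0 + 1))[m]?
      = some (a[m]'hm + (if i = (m : Int) then 1 else 0)) := by
  rw [PySem.List.pySetD_of_nonneg _ _ hi, List.getElem?_set]
  by_cases him : i = (m : Int)
  · have htn : i.toNat = m := by omega
    rw [if_pos htn, if_pos (by omega)]
    rw [PySem.List.pyGetD_eq_getElem a 0 hi (by omega)]
    simp [him, htn]
  · have htn : i.toNat ≠ m := by omega
    rw [if_neg htn, List.getElem?_eq_getElem hm, if_neg him]
    simp

lemma pv_inc_len (s : List Int) : ∀ (a : List Int), (s.foldl pvAInc a).length = a.length := by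
  induction s with
  | nil => intro a; rfl
  | cons i t ih =>
      intro a
      simp only [List.foldl_cons]
      rw [ih]
      simp [pvAInc, PySem.List.length_pySetD]

lemma pv_inc_fold (s : List Int) : ∀ (a : List Int) (m : Nat) (hm : m < a.length),
    (∀ i ∈ s, 0 ≤ i) →
    (s.foldl pvAInc a)[m]? = some (a[m]'hm + (s.count (m : Int) : Int)) := by
  induction s with
  | nil =>
      intro a m hm _
      simp only [List.foldl_nil]
      rw [List.getElem?_eq_getElem hm]
      simp
  | cons i t ih =>
      intro a m hm hnn
      have hi : 0 ≤ i := hnn i List.mem_cons_self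
      simp only [List.foldl_cons]
      have hlen' : (pvAInc a i).length = a.length := by
        simp [pvAInc, PySem.List.length_pySetD]
      have h1 : m < (pvAInc a i).length := by omega
      rw [ih (pvAInc a i) m h1 (fun x hx => hnn x (List.mem_cons_of_mem _ hx))]
      have hq : (pvAInc a i)[m]? = some (a[m]'hm + (if i = (m : Int) then 1 else 0)) :=
        pv_inc_one a i hi m hm
      have hval : (pvAInc a i)[m]'h1 = a[m]'hm + (if i = (m : Int) then 1 else 0) :=
        Option.some.inj ((List.getElem?_eq_getElem h1).symm.trans hq)
      rw [hval, List.count_cons]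
      by_cases him : i = (m : Int)
      · have hb : (i == (m : Int)) = true := by simp [him]
        rw [if_pos him, hb, if_pos rfl]
        congr 1
        push_cast
        ring
      · have hb : (i == (m : Int)) = false := by simp [him]
        rw [if_neg him, hb]
        simp

lemma pv_award_len (k : Int) (S : List (PySem.Set Int)) :
    ∀ (a : List Int), (S.foldl (pvAAward k) a).length = a.length := by
  induction S with
  | nil => intro a; rfl
  | cons s t ih =>
      intro a
      simp only [List.foldl_cons]
      rw [ih]
      unfold pvAAward
      split
      · exact pv_inc_len s a
      · rfl

lemma pv_award_fold (k : Int) (S : List (PySem.Set Int)) :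
    ∀ (a : List Int) (m : Nat) (hm : m < a.length),
    (∀ s ∈ S, (∀ i ∈ s, 0 ≤ i) ∧ List.Nodup s) →
    (S.foldl (pvAAward k) a)[m]?
      = some (a[m]'hm +
          (S.countP (fun s => decide (k ≤ PySem.Set.len s) && decide ((m : Int) ∈ s)) : Int)) := by
  induction S with
  | nil =>
      intro a m hm _
      simp only [List.foldl_nil, List.countP_nil]
      rw [List.getElem?_eq_getElem hm]
      simp
  | cons s t ih =>
      intro a m hm hS
      obtain ⟨hnn, hnd⟩ := hS s List.mem_cons_self
      simp only [List.foldl_cons]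
      by_cases hk : k ≤ PySem.Set.len s
      · have hstep : pvAAward k a s = s.foldl pvAInc a := by
          unfold pvAAward
          rw [if_pos hk]
        have hlen' : (s.foldl pvAInc a).length = a.length := pv_inc_len s a
        have h1 : m < (s.foldl pvAInc a).length := by omega
        rw [hstep, ih _ m h1 (fun x hx => hS x (List.mem_cons_of_mem _ hx))]
        have hval : (s.foldl pvAInc a)[m]'h1 = a[m]'hm + (s.count (m : Int) : Int) :=
          Option.some.inj ((List.getElem?_eq_getElem h1).symm.trans (pv_inc_fold s a m hm hnn))
        rw [hval, List.countP_cons]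
        have hcnt : s.count (m : Int) = if (m : Int) ∈ s then 1 else 0 := by
          by_cases hmem : (m : Int) ∈ s
          · rw [if_pos hmem]
            exact List.count_eq_one_of_mem hnd hmem
          · rw [if_neg hmem]
            exact List.count_eq_zero.mpr hmem
        rw [hcnt]
        by_cases hmem : (m : Int) ∈ s
        · simp only [hmem, hk, decide_true, Bool.and_self, if_pos, if_true]
          congr 1
          push_cast
          ring
        · simp only [hmem, hk, decide_true, decide_false, Bool.and_false, if_false]
          simp
      · have hstep : pvAAward k a s = a := by
          unfold pvAAward
          rw [if_neg hk]
        rw [hstep, ih a m hm (fun x hx => hS x (List.mem_cons_of_mem _ hx))]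
        rw [List.countP_cons]
        have : (decide (k ≤ PySem.Set.len s) && decide ((m : Int) ∈ s)) = false := by
          rw [decide_eq_false hk, Bool.false_and]
        rw [this]
        simp

lemma pv_getD_fold_modify {α : Type} (key : α → String) :
    ∀ (l : List α) (d : PySem.Dict String Int) (v : String),
    (l.foldl (fun d x => d.modify (key x) 0 (· + 1)) d).getD v 0
      = d.getD v 0 + (l.countP (fun x => key x == v) : Int) := by
  intro l
  induction l with
  | nil => intro d v; simp
  | cons x t ih =>
      intro d v
      simp only [List.foldl_cons]
      rw [ih, PySem.Dict.getD_modify, List.countP_cons]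
      by_cases hv : v = key x
      · rw [if_pos hv, hv]
        simp
        push_cast
        ring
      · rw [if_neg hv]
        have : (key x == v) = false := by
          simp
          exact fun h => hv h.symm
        simp [this]

lemma pv_cnt_getD (P : List (String × String)) (u : String) :
    (P.foldl (fun d p => d.modify p.2 0 (· + 1)) PySem.Dict.empty).getD u 0
      = (P.countP (fun p => p.2 == u) : Int) := by
  have h := pv_getD_fold_modify (fun p : String × String => p.2) P PySem.Dict.empty u
  simpa using h

-- B's awarding pass, seen at position m
lemma pv_bres_len (k : Int) (cnt pos : PySem.Dict String Int) (P : List (String × String)) :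
    ∀ (a : List Int),
    (P.foldl (fun a p => if k ≤ cnt.getD p.2 0
        then PySem.List.pySetD a (pos.getD p.1 0) (PySem.List.pyGetD a (pos.getD p.1 0) 0 + 1)
        else a) a).length = a.length := by
  induction P with
  | nil => intro a; rfl
  | cons p t ih =>
      intro a
      simp only [List.foldl_cons]
      rw [ih]
      split
      · simp [PySem.List.length_pySetD]
      · rfl

lemma pv_bres_fold (k : Int) (cnt pos : PySem.Dict String Int) (P : List (String × String)) :
    ∀ (a : List Int) (m : Nat) (hm : m < a.length),
    (∀ p ∈ P, 0 ≤ pos.getD p.1 0) →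
    (P.foldl (fun a p => if k ≤ cnt.getD p.2 0
        then PySem.List.pySetD a (pos.getD p.1 0) (PySem.List.pyGetD a (pos.getD p.1 0) 0 + 1)
        else a) a)[m]?
      = some (a[m]'hm +
          (P.countP (fun p => decide (k ≤ cnt.getD p.2 0)
            && (pos.getD p.1 0 == (m : Int))) : Int)) := by
  induction P with
  | nil =>
      intro a m hm _
      simp only [List.foldl_nil, List.countP_nil]
      rw [List.getElem?_eq_getElem hm]
      simp
  | cons p t ih =>
      intro a m hm hnn
      have hp : 0 ≤ pos.getD p.1 0 := hnn p List.mem_cons_self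
      simp only [List.foldl_cons]
      by_cases hk : k ≤ cnt.getD p.2 0
      · rw [if_pos hk]
        have hlen' : (PySem.List.pySetD a (pos.getD p.1 0)
            (PySem.List.pyGetD a (pos.getD p.1 0) 0 + 1)).length = a.length :=
          PySem.List.length_pySetD _ _ _
        have h1 : m < (PySem.List.pySetD a (pos.getD p.1 0)
            (PySem.List.pyGetD a (pos.getD p.1 0) 0 + 1)).length := by omega
        rw [ih _ m h1 (fun x hx => hnn x (List.mem_cons_of_mem _ hx))]
        have hval : (PySem.List.pySetD a (pos.getD p.1 0)
              (PySem.List.pyGetD a (pos.getD p.1 0) 0 + 1))[m]'h1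
            = a[m]'hm + (if pos.getD p.1 0 = (m : Int) then 1 else 0) :=
          Option.some.inj ((List.getElem?_eq_getElem h1).symm.trans
            (pv_inc_one a (pos.getD p.1 0) hp m hm))
        rw [hval, List.countP_cons]
        by_cases him : pos.getD p.1 0 = (m : Int)
        · have hb : (decide (k ≤ cnt.getD p.2 0) && (pos.getD p.1 0 == (m : Int))) = true := by
            simp [him, hk]
          rw [if_pos him, hb, if_pos rfl]
          congr 1
          push_cast
          ring
        · have hb : (decide (k ≤ cnt.getD p.2 0) && (pos.getD p.1 0 == (m : Int))) = false := by
            simp [him]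
          rw [if_neg him, hb]
          simp
      · rw [if_neg hk]
        rw [ih a m hm (fun x hx => hnn x (List.mem_cons_of_mem _ hx))]
        rw [List.countP_cons]
        have hb : (decide (k ≤ cnt.getD p.2 0) && (pos.getD p.1 0 == (m : Int))) = false := by
          rw [decide_eq_false hk, Bool.false_and]
        rw [hb]
        simp

lemma pv_slot_len (id_list : List String) (L : List (String × String))
    (hc : ∀ p ∈ L, p.1 ∈ id_list ∧ p.2 ∈ id_list) (j : Int) (w : String) (hw : w ∈ id_list)
    (hjw : (pvAIds id_list).getD w 0 = j) :
    PySem.Set.len (pvSlot id_list L j)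
      = ((PySem.Set.ofList L).countP (fun p => p.2 == w) : Int) := by
  have hpred : ∀ p ∈ L, ((pvAIds id_list).getD p.2 0 == j) = (p.2 == w) := by
    intro p hpL
    by_cases h : p.2 = w
    · rw [h, hjw]
      simp
    · have hne : (pvAIds id_list).getD p.2 0 ≠ j := by
        intro hh
        exact h (pv_idx_inj id_list p.2 w (hc p hpL).2 hw (by rw [hh, hjw]))
      simp [h, hne]
  have hfe : pvSlot id_list L j
      = PySem.Set.ofList ((L.filter (fun p => p.2 == w)).map
          (fun p => (pvAIds id_list).getD p.1 0)) := by
    unfold pvSlot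
    rw [List.filter_congr hpred]
  rw [hfe]
  have hfn : ((PySem.Set.ofList L).filter (fun p => p.2 == w)).Nodup :=
    (PySem.Set.nodup_ofList L).filter _
  have hRnd : (((PySem.Set.ofList L).filter (fun p => p.2 == w)).map
      (fun p => (pvAIds id_list).getD p.1 0)).Nodup := by
    refine (List.nodup_map_iff_inj_on hfn).mpr ?_
    intro p hp q hq hfeq
    obtain ⟨hpS, hpw⟩ := List.mem_filter.mp hp
    obtain ⟨hqS, hqw⟩ := List.mem_filter.mp hq
    have hp1 : p.1 ∈ id_list := (hc p ((PySem.Set.mem_ofList L p).mp hpS)).1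
    have hq1 : q.1 ∈ id_list := (hc q ((PySem.Set.mem_ofList L q).mp hqS)).1
    have h1 : p.1 = q.1 := pv_idx_inj id_list p.1 q.1 hp1 hq1 hfeq
    have h2 : p.2 = q.2 := by rw [beq_iff_eq.mp hpw, beq_iff_eq.mp hqw]
    exact Prod.ext_iff.mpr ⟨h1, h2⟩
  have hperm : (PySem.Set.ofList ((L.filter (fun p => p.2 == w)).map
        (fun p => (pvAIds id_list).getD p.1 0))).Perm
      (((PySem.Set.ofList L).filter (fun p => p.2 == w)).map
        (fun p => (pvAIds id_list).getD p.1 0)) := by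
    refine (List.perm_ext_iff_of_nodup (PySem.Set.nodup_ofList _) hRnd).mpr ?_
    intro x
    simp [PySem.Set.mem_ofList, List.mem_filter, List.mem_map]
  show ((PySem.Set.ofList _).length : Int) = _
  rw [hperm.length_eq, List.length_map, ← List.countP_eq_length_filter]

lemma pv_final (id_list : List String) (L : List (String × String))
    (hc : ∀ p ∈ L, p.1 ∈ id_list ∧ p.2 ∈ id_list) (k : Int) (cnt : PySem.Dict String Int)
    (hcnt : ∀ u, cnt.getD u 0 = ((PySem.Set.ofList L).countP (fun p => p.2 == u) : Int))
    (m : Nat) :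
    (PySem.List.pyRange 0 (id_list.length : Int) 1).countP
        (fun j => decide (k ≤ PySem.Set.len (pvSlot id_list L j))
          && decide ((m : Int) ∈ pvSlot id_list L j))
      = (PySem.Set.ofList L).countP
          (fun p => decide (k ≤ cnt.getD p.2 0)
            && ((pvAIds id_list).getD p.1 0 == (m : Int))) := by
  rw [List.countP_eq_length_filter, List.countP_eq_length_filter]
  have hQnd : (((PySem.Set.ofList L).filter (fun p => decide (k ≤ cnt.getD p.2 0)
      && ((pvAIds id_list).getD p.1 0 == (m : Int)))).map
      (fun p => (pvAIds id_list).getD p.2 0)).Nodup := by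
    refine (List.nodup_map_iff_inj_on ((PySem.Set.nodup_ofList L).filter _)).mpr ?_
    intro p hp q hq hfeq
    obtain ⟨hpS, hpQ⟩ := List.mem_filter.mp hp
    obtain ⟨hqS, hqQ⟩ := List.mem_filter.mp hq
    have hpL := (PySem.Set.mem_ofList L p).mp hpS
    have hqL := (PySem.Set.mem_ofList L q).mp hqS
    obtain ⟨-, hpm⟩ := Bool.and_eq_true_iff.mp hpQ
    obtain ⟨-, hqm⟩ := Bool.and_eq_true_iff.mp hqQ
    have h1 : p.1 = q.1 := pv_idx_inj id_list p.1 q.1 (hc p hpL).1 (hc q hqL).1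
      (by rw [beq_iff_eq.mp hpm, beq_iff_eq.mp hqm])
    have h2 : p.2 = q.2 := pv_idx_inj id_list p.2 q.2 (hc p hpL).2 (hc q hqL).2 hfeq
    exact Prod.ext_iff.mpr ⟨h1, h2⟩
  have hperm : (((PySem.Set.ofList L).filter (fun p => decide (k ≤ cnt.getD p.2 0)
        && ((pvAIds id_list).getD p.1 0 == (m : Int)))).map
        (fun p => (pvAIds id_list).getD p.2 0)).Perm
      ((PySem.List.pyRange 0 (id_list.length : Int) 1).filter
        (fun j => decide (k ≤ PySem.Set.len (pvSlot id_list L j))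
          && decide ((m : Int) ∈ pvSlot id_list L j))) := by
    refine (List.perm_ext_iff_of_nodup hQnd
      ((PySem.List.nodup_pyRange_one _ _).filter _)).mpr ?_
    intro j
    constructor
    · intro hj
      obtain ⟨p, hpF, hpj⟩ := List.mem_map.mp hj
      obtain ⟨hpS, hpQ⟩ := List.mem_filter.mp hpF
      have hpL := (PySem.Set.mem_ofList L p).mp hpS
      obtain ⟨hpk, hpm⟩ := Bool.and_eq_true_iff.mp hpQ
      have hp2 := (hc p hpL).2
      have hnn := pv_idx_nonneg id_list p.2 hp2
      have hlt := pv_idx_lt id_list p.2 hp2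
      have hj2 : (pvAIds id_list).getD p.2 0 = j := hpj
      refine List.mem_filter.mpr ⟨PySem.List.mem_pyRange_one.mpr ⟨by omega, by omega⟩, ?_⟩
      refine Bool.and_eq_true_iff.mpr ⟨?_, ?_⟩
      · have hlen := pv_slot_len id_list L hc j p.2 hp2 hj2
        rw [decide_eq_true_eq, hlen, ← hcnt p.2]
        exact of_decide_eq_true hpk
      · rw [decide_eq_true_eq]
        unfold pvSlot
        rw [PySem.Set.mem_ofList]
        refine List.mem_map.mpr ⟨p, List.mem_filter.mpr ⟨hpL, by simp [hj2]⟩, ?_⟩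
        exact beq_iff_eq.mp hpm
    · intro hj
      obtain ⟨hjr, hjP⟩ := List.mem_filter.mp hj
      obtain ⟨hjk, hjm⟩ := Bool.and_eq_true_iff.mp hjP
      have hjm' : (m : Int) ∈ pvSlot id_list L j := of_decide_eq_true hjm
      unfold pvSlot at hjm'
      rw [PySem.Set.mem_ofList] at hjm'
      obtain ⟨p, hpF, hpm⟩ := List.mem_map.mp hjm'
      obtain ⟨hpL, hpj⟩ := List.mem_filter.mp hpF
      have hj2 : (pvAIds id_list).getD p.2 0 = j := beq_iff_eq.mp hpj
      refine List.mem_map.mpr ⟨p, List.mem_filter.mpr ⟨(PySem.Set.mem_ofList L p).mpr hpL, ?_⟩,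
        hj2⟩
      refine Bool.and_eq_true_iff.mpr ⟨?_, by simp [hpm]⟩
      have hlen := pv_slot_len id_list L hc j p.2 (hc p hpL).2 hj2
      rw [decide_eq_true_eq, hcnt p.2, ← hlen]
      exact of_decide_eq_true hjk
  calc ((PySem.List.pyRange 0 (id_list.length : Int) 1).filter
        (fun j => decide (k ≤ PySem.Set.len (pvSlot id_list L j))
          && decide ((m : Int) ∈ pvSlot id_list L j))).length
      = (((PySem.Set.ofList L).filter (fun p => decide (k ≤ cnt.getD p.2 0)
          && ((pvAIds id_list).getD p.1 0 == (m : Int)))).map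
          (fun p => (pvAIds id_list).getD p.2 0)).length := hperm.length_eq.symm
    _ = ((PySem.Set.ofList L).filter (fun p => decide (k ≤ cnt.getD p.2 0)
          && ((pvAIds id_list).getD p.1 0 == (m : Int)))).length := by simp

-- ===== VERDICT (by name: the statement is the Claim_ definition above) =====
theorem solution_spec : Claim_equal_solution := by
  intro id_list report k _ hpre
  unfold Spec_solution
  have hsplit : ∀ r ∈ report, (PySem.Str.split₀ r).length = 2 := fun r hr => (hpre r hr).1
  have hLmem : ∀ p ∈ report.map pvParse, p.1 ∈ id_list ∧ p.2 ∈ id_list := by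
    intro p hp
    obtain ⟨r, hr, rfl⟩ := List.mem_map.mp hp
    exact ⟨(hpre r hr).2.1, (hpre r hr).2.2⟩
  simp only [solution, solution_alt]
  rw [pv_numbers0, pvBPos_eq]
  have hAfold : report.foldl (pvAStep (pvAIds id_list))
        (List.replicate id_list.length PySem.Set.empty)
      = (report.map pvParse).foldl (pvAStep2 (pvAIds id_list))
          (List.replicate id_list.length PySem.Set.empty) := by
    rw [List.foldl_map]
    exact PySem.List.foldl_congr_mem report _ _ _
      (fun acc r hr => pvAStep_eq _ _ _ (hsplit r hr))
  have hBfold : report.foldl pvBPair PySem.Set.empty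
      = PySem.Set.ofList (report.map pvParse) := by
    rw [PySem.Set.ofList_eq_foldl, List.foldl_map]
    exact PySem.List.foldl_congr_mem report _ _ _
      (fun acc r hr => pvBPair_eq _ _ (hsplit r hr))
  rw [hAfold, hBfold]
  have hnums : (report.map pvParse).foldl (pvAStep2 (pvAIds id_list))
        (List.replicate id_list.length PySem.Set.empty)
      = (PySem.List.pyRange 0 (id_list.length : Int) 1).map
          (pvSlot id_list (report.map pvParse)) := by
    apply List.ext_getElem?
    intro j
    by_cases hj : j < id_list.length
    · rw [pv_group id_list _ hLmem _ (by simp) j hj]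
      have hjr : j < (PySem.List.pyRange 0 (id_list.length : Int) 1).length := by
        rw [PySem.List.length_pyRange_one]
        omega
      rw [List.getElem?_map, List.getElem?_eq_getElem hjr]
      rw [PySem.List.getElem_pyRange_one]
      simp only [Option.map_some]
      congr 1
      rw [List.getElem_replicate, PySem.Set.update_empty]
      have hz : (0 : Int) + (j : Int) = (j : Int) := by ring
      rw [hz]
      rfl
    · rw [List.getElem?_eq_none (by rw [pv_group_len]; simp; omega),
          List.getElem?_eq_none (by rw [List.length_map, PySem.List.length_pyRange_one]; omega)]
  rw [hnums]
  apply List.ext_getElem?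
  intro m
  by_cases hm : m < id_list.length
  · have hScond : ∀ s ∈ (PySem.List.pyRange 0 (id_list.length : Int) 1).map
          (pvSlot id_list (report.map pvParse)),
        (∀ i ∈ s, 0 ≤ i) ∧ List.Nodup s := by
      intro s hs
      obtain ⟨j, _, rfl⟩ := List.mem_map.mp hs
      refine ⟨?_, PySem.Set.nodup_ofList _⟩
      intro i hi
      obtain ⟨p, hp, rfl⟩ := List.mem_map.mp ((PySem.Set.mem_ofList _ i).mp hi)
      exact pv_idx_nonneg id_list p.1 (hLmem p (List.mem_of_mem_filter hp)).1
    have hBnn : ∀ p ∈ PySem.Set.ofList (report.map pvParse),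
        0 ≤ (pvAIds id_list).getD p.1 0 := by
      intro p hp
      exact pv_idx_nonneg id_list p.1 (hLmem p ((PySem.Set.mem_ofList _ p).mp hp)).1
    rw [pv_award_fold k _ _ m (by simp [hm]) hScond]
    rw [pv_bres_fold k _ _ _ _ m (by simp [hm]) hBnn]
    congr 2
    rw [List.countP_map]
    rw [show ((fun s => decide (k ≤ PySem.Set.len s) && decide ((m : Int) ∈ s))
          ∘ pvSlot id_list (report.map pvParse))
        = (fun j => decide (k ≤ PySem.Set.len (pvSlot id_list (report.map pvParse) j))
            && decide ((m : Int) ∈ pvSlot id_list (report.map pvParse) j)) from rfl]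
    exact_mod_cast pv_final id_list (report.map pvParse) hLmem k _
      (fun u => pv_cnt_getD (PySem.Set.ofList (report.map pvParse)) u) m
  · rw [List.getElem?_eq_none (by rw [pv_award_len]; simp; omega),
        List.getElem?_eq_none (by rw [pv_bres_len]; simp; omega)]
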